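-- pv_equiv track=rewrite | github.com/jonathanto99/jonathanto99 | research/scripts/python/fasta_analyzer.py | sequence_valid
-- ===== SOURCE A (Python) =====
-- def sequence_valid(sequence):
--     sequence = sequence.strip()
--
--     if len(sequence) == 0:
--         return False
--
--     for nuc in sequence:
--         if nuc.upper() not in "ATGC":
--             return False
--
--     return True
-- ===== SOURCE B (Python) =====
-- def sequence_valid(sequence):
--     s = sequence.strip().upper()
--     return len(s) > 0 and s.count("A") + s.count("T") + s.count("G") + s.count("C") == len(s)
-- ===== Notes on version B (the rewrite author's own statement) =====
-- stated objective: alternative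
-- what changed: Replaces the per-character short-circuiting membership loop with four whole-string count() scans whose tallies are summed and compared arithmetically against the string length (every character is counted iff it is a nucleotide).
import Mathlib
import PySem

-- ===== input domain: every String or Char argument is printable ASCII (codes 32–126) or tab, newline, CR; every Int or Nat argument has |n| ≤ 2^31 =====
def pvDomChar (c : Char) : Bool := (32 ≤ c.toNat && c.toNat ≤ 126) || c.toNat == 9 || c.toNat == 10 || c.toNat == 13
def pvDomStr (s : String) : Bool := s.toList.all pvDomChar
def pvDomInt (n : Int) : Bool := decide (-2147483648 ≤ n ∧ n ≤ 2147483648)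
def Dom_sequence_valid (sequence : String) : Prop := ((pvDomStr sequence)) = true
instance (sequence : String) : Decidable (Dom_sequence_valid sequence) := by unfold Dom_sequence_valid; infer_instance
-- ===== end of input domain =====

-- B replaces A's per-character early-exit membership loop with four count() scans summed and compared to the length (alternative decomposition, same cost).

-- ===== PORT A =====
-- the for-loop with its early 'return False'
def seqValidLoopA : List Char → Bool
  | [] => true
  | nuc :: rest =>
    if (PySem.Chars.upperChar nuc) ∈ "ATGC".toList then seqValidLoopA rest else false

def sequence_valid (sequence : String) : Bool :=
  let s := PySem.Str.strip sequence
  if PySem.Str.len s = 0 then false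
  else seqValidLoopA s.toList

-- ===== PORT B =====
def sequence_valid_alt (sequence : String) : Bool :=
  let s := PySem.Str.upper (PySem.Str.strip sequence)
  decide (0 < PySem.Str.len s) &&
    decide (((PySem.Str.count s "A" + PySem.Str.count s "T"
              + PySem.Str.count s "G" + PySem.Str.count s "C" : Nat) : Int) = PySem.Str.len s)

-- ===== PRECONDITION & SPEC =====
def Spec_sequence_valid (sequence : String) (out : Bool) : Prop := out = sequence_valid_alt sequence
instance (sequence : String) (out : Bool) : Decidable (Spec_sequence_valid sequence out) := by unfold Spec_sequence_valid; infer_instance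

-- ===== CLAIM (what is proved, stated in full; the proofs are below) =====
def Claim_equal_sequence_valid : Prop := ∀ (sequence : String), Dom_sequence_valid sequence → Spec_sequence_valid sequence (sequence_valid sequence)

-- ===== LEMMAS AND PROOFS =====
-- count.go with a one-character needle counts occurrences of that character
lemma count_go_singleton (c : Char) : ∀ (fuel : Nat) (l : List Char) (acc : Nat),
    l.length ≤ fuel → PySem.Chars.count.go [c] fuel l acc = acc + l.count c := by
  intro fuel
  induction fuel with
  | zero =>
    intro l acc h
    have : l = [] := List.length_eq_zero_iff.mp (Nat.le_zero.mp h)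
    subst this
    simp [PySem.Chars.count.go]
  | succ n ih =>
    intro l acc h
    cases l with
    | nil => simp [PySem.Chars.count.go]
    | cons x t =>
      have ht : t.length ≤ n := by simpa using h
      by_cases hx : x = c
      · subst hx
        have hp : List.isPrefixOf [x] (x :: t) = true := by
          simp [List.isPrefixOf]
        simp only [PySem.Chars.count.go, hp, if_pos]
        rw [show List.drop (List.length [x]) (x :: t) = t from rfl, ih t (acc + 1) ht]
        simp
        omega
      · have hp : List.isPrefixOf [c] (x :: t) = false := by
          simp [List.isPrefixOf]
          exact fun h' => hx h'.symm
        simp only [PySem.Chars.count.go]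
        rw [if_neg (by simp [hp]), ih t acc ht]
        simp [hx]

lemma chars_count_singleton (c : Char) (l : List Char) :
    PySem.Chars.count l [c] = l.count c := by
  unfold PySem.Chars.count
  rw [if_neg (by simp), count_go_singleton c l.length l 0 le_rfl]
  simp

-- the four nucleotide counts sum to the count of characters that are nucleotides
lemma sum_counts_eq_countP (u : List Char) :
    u.count 'A' + u.count 'T' + u.count 'G' + u.count 'C'
      = u.countP (fun c => c == 'A' || c == 'T' || c == 'G' || c == 'C') := by
  induction u with
  | nil => rfl
  | cons c t ih =>
    simp only [List.count_cons, List.countP_cons]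
    by_cases hA : c = 'A' <;> by_cases hT : c = 'T' <;> by_cases hG : c = 'G' <;>
      by_cases hC : c = 'C' <;> simp_all <;> omega

-- A's loop is an all-characters check
lemma seqValidLoopA_eq_all (l : List Char) :
    seqValidLoopA l = l.all (fun c => decide ((PySem.Chars.upperChar c) ∈ "ATGC".toList)) := by
  induction l with
  | nil => rfl
  | cons c rest ih =>
    simp only [seqValidLoopA, List.all_cons, ih]
    by_cases h : (PySem.Chars.upperChar c) ∈ "ATGC".toList
    · simp only [h, decide_true, Bool.true_and, if_true]
    · simp only [h, decide_false, Bool.false_and, if_false]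

lemma atgc_toList : "ATGC".toList = ['A', 'T', 'G', 'C'] := rfl

-- the whole equivalence at the level of the stripped character list
lemma core_eq (l : List Char) :
    (if ((l.length : Int)) = 0 then false else seqValidLoopA l)
      = (decide ((0 : Int) < ((l.map PySem.Chars.upperChar).length : Int)) &&
         decide ((((l.map PySem.Chars.upperChar).count 'A'
                   + (l.map PySem.Chars.upperChar).count 'T'
                   + (l.map PySem.Chars.upperChar).count 'G'
                   + (l.map PySem.Chars.upperChar).count 'C' : Nat) : Int)
                 = ((l.map PySem.Chars.upperChar).length : Int))) := by
  rw [List.length_map, sum_counts_eq_countP]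
  by_cases h0 : l = []
  · subst h0; simp
  · have hpos : 0 < l.length := List.length_pos_iff.mpr h0
    rw [if_neg (by exact_mod_cast hpos.ne'), seqValidLoopA_eq_all]
    have h1 : decide ((0 : Int) < (l.length : Int)) = true := by
      simp; exact_mod_cast hpos
    rw [h1, Bool.true_and, Bool.eq_iff_iff]
    simp only [List.all_eq_true, decide_eq_true_eq, atgc_toList, List.mem_cons,
      List.not_mem_nil, or_false, Nat.cast_inj]
    rw [show l.length = (l.map PySem.Chars.upperChar).length from (List.length_map ..).symm,
        List.countP_eq_length]
    constructor
    · intro hall a ha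
      obtain ⟨c, hc, rfl⟩ := List.mem_map.mp ha
      rcases hall c hc with h | h | h | h <;> simp [h]
    · intro hall c hc
      have := hall (PySem.Chars.upperChar c) (List.mem_map_of_mem hc)
      simp only [Bool.or_eq_true, beq_iff_eq] at this
      tauto

-- ===== VERDICT (by name: the statement is the Claim_ definition above) =====
theorem sequence_valid_spec : Claim_equal_sequence_valid := by
  intro sequence _
  unfold Spec_sequence_valid sequence_valid sequence_valid_alt
  simp only [PySem.Str.len_eq, PySem.Str.count_eq, PySem.Str.toList_upper, PySem.Str.toList_strip]
  rw [show ("A".toList) = ['A'] from rfl, show ("T".toList) = ['T'] from rfl,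
      show ("G".toList) = ['G'] from rfl, show ("C".toList) = ['C'] from rfl]
  simp only [chars_count_singleton, PySem.Chars.upper]
  exact core_eq (PySem.Chars.strip sequence.toList)
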